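-- pv_equiv track=rewrite | github.com/GermanTsymidanov/Untitled-222 | numbers = [1, 2, 3, 4, 5].py | can_sell_tickets
-- ===== SOURCE A (Python) =====
-- def can_sell_tickets(seats, K):
--  for row in seats:
--      consecutive = 0
--      for seat in row:
--          if seat == 0:
--              consecutive += 1
--              if consecutive == K:
--                  return True
--          else:
--              consecutive = 0
--  return False
-- ===== SOURCE B (Python) =====
-- def can_sell_tickets(seats, K):
--     if K < 1:
--         return False
--     for row in seats:
--         # run-length encode the row into maximal groups, most recent group first
--         groups = []  # list of (is_empty, run_length)
--         for s in row:
--             empty = (s == 0)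
--             if groups and groups[0][0] == empty:
--                 groups[0] = (empty, groups[0][1] + 1)
--             else:
--                 groups.insert(0, (empty, 1))
--         if any(empty and n >= K for empty, n in groups):
--             return True
--     return False
-- ===== Notes on version B (the rewrite author's own statement) =====
-- stated objective: alternative
-- what changed: B first guards K < 1, then run-length-encodes each row into maximal groups of equal emptiness and checks whether any empty group has length >= K, instead of A's early-returning consecutive counter.
import Mathlib
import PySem

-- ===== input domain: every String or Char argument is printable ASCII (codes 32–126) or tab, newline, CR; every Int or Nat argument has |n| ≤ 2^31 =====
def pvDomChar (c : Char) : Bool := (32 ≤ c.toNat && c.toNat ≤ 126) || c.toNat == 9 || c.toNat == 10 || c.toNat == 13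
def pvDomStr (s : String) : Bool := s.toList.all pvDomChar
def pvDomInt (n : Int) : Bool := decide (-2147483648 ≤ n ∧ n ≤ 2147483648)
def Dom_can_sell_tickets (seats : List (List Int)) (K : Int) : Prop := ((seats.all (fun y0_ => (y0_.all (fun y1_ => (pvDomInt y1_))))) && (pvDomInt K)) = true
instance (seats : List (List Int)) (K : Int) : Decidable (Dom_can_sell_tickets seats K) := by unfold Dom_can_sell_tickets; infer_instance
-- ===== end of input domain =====

-- B replaces A's early-returning consecutive counter by a K<1 guard plus a run-length
-- encoding of each row, checking for an empty group of length >= K (objective: alternative).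


-- ===== PORT A =====
-- inner loop of A: running count `c` of consecutive zeros, early return when c reaches K
def scanRowA (K : Int) : List Int → Int → Bool
  | [], _ => false
  | s :: rest, c =>
      if s == 0 then
        if c + 1 == K then true else scanRowA K rest (c + 1)
      else scanRowA K rest 0

-- outer loop of A over the rows, with the early return
def rowsA (K : Int) : List (List Int) → Bool
  | [] => false
  | row :: rest => if scanRowA K row 0 then true else rowsA K rest

def can_sell_tickets (seats : List (List Int)) (K : Int) : Bool :=
  rowsA K seats

-- ===== PORT B =====
-- one step of B's run-length encoder: extend the most recent group or start a new one
def stepB (gs : List (Bool × Nat)) (s : Int) : List (Bool × Nat) :=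
  let empty := s == 0
  match gs with
  | (k, n) :: r => if k == empty then (k, n + 1) :: r else (empty, 1) :: (k, n) :: r
  | [] => [(empty, 1)]

-- B's groups of a row (maximal runs of equal emptiness, most recent first)
def groupsB (row : List Int) : List (Bool × Nat) :=
  row.foldl stepB []

def can_sell_tickets_alt (seats : List (List Int)) (K : Int) : Bool :=
  if K < 1 then false
  else seats.any (fun row => (groupsB row).any (fun g => g.1 && decide (K ≤ (g.2 : Int))))

-- ===== PRECONDITION & SPEC =====
def Spec_can_sell_tickets (seats : List (List Int)) (K : Int) (out : Bool) : Prop := out = can_sell_tickets_alt seats K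
instance (seats : List (List Int)) (K : Int) (out : Bool) : Decidable (Spec_can_sell_tickets seats K out) := by unfold Spec_can_sell_tickets; infer_instance

-- ===== CLAIM (what is proved, stated in full; the proofs are below) =====
def Claim_equal_can_sell_tickets : Prop := ∀ (seats : List (List Int)) (K : Int), Dom_can_sell_tickets seats K → Spec_can_sell_tickets seats K (can_sell_tickets seats K)

-- ===== LEMMAS AND PROOFS =====

-- the per-group test of B, for a fixed K
def pB (K : Int) (g : Bool × Nat) : Bool := g.1 && decide (K ≤ (g.2 : Int))

-- once some group satisfies pB, the rest of the fold keeps it satisfied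
lemma anyP_foldl (K : Int) : ∀ (row : List Int) (gs : List (Bool × Nat)),
    gs.any (pB K) = true → (row.foldl stepB gs).any (pB K) = true := by
  intro row
  induction row with
  | nil => intro gs h; simpa using h
  | cons s rest ih =>
      intro gs h
      simp only [List.foldl_cons]
      apply ih
      unfold stepB
      match gs with
      | [] => simp at h
      | (k, n) :: r =>
          simp only [List.any_cons, Bool.or_eq_true] at h
          by_cases hk : (k == (s == 0)) = true
          · simp only [hk, if_pos]
            rcases h with h | h
            · have : pB K (k, n + 1) = true := by
                unfold pB at h ⊢
                simp only [Bool.and_eq_true, decide_eq_true_eq] at h ⊢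
                exact ⟨h.1, by push_cast; omega⟩
              simp [List.any_cons, this]
            · simp [List.any_cons, h]
          · simp only [hk, if_neg, Bool.not_eq_true]
            rcases h with h | h
            · simp [List.any_cons, h]
            · simp [List.any_cons, h]

-- A never returns True for K ≤ 0 (the counter check fires only at positive counts)
lemma scanA_false_of_K_nonpos (K : Int) (hK : K ≤ 0) :
    ∀ (row : List Int) (c : Int), 0 ≤ c → scanRowA K row c = false := by
  intro row
  induction row with
  | nil => intro c _; rfl
  | cons s rest ih =>
      intro c hc
      unfold scanRowA
      by_cases hs : (s == 0) = true
      · have : (c + 1 == K) = false := by simp; omega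
        simp [hs, this]
        exact ih (c + 1) (by omega)
      · simp [hs]
        exact ih 0 (by omega)

-- key invariant: A's scan at counter m, with accumulated groups gs none of which already
-- satisfies pB and whose head reflects the current run, equals B's check on the final groups
lemma scan_eq_groups (K : Int) (hK : 1 ≤ K) :
    ∀ (row : List Int) (m : Nat) (gs : List (Bool × Nat)),
      (m : Int) < K →
      gs.any (pB K) = false →
      (m = 0 → gs = [] ∨ ∃ n r, gs = (false, n) :: r) →
      (0 < m → ∃ r, gs = (true, m) :: r) →
      scanRowA K row (m : Int) = (row.foldl stepB gs).any (pB K) := by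
  intro row
  induction row with
  | nil =>
      intro m gs _ hany _ _
      simp [scanRowA, hany]
  | cons s rest ih =>
      intro m gs hm hany h0 hpos
      simp only [List.foldl_cons]
      by_cases hs : (s == 0) = true
      · -- empty seat: counter becomes m+1; head group becomes (true, m+1)
        have hgs'' : ∃ t, stepB gs s = (true, m + 1) :: t ∧ t.any (pB K) = false := by
          rcases Nat.eq_zero_or_pos m with hm0 | hm0
          · subst hm0
            rcases h0 rfl with h | ⟨n, r, h⟩
            · subst h
              exact ⟨[], by simp [stepB, hs], rfl⟩
            · subst h
              refine ⟨(false, n) :: r, by simp [stepB, hs], hany⟩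
          · obtain ⟨r, h⟩ := hpos hm0
            subst h
            simp only [List.any_cons, Bool.or_eq_false_iff] at hany
            exact ⟨r, by simp [stepB, hs], hany.2⟩
        obtain ⟨t, ht, htany⟩ := hgs''
        unfold scanRowA
        by_cases hK' : ((m : Int) + 1 == K) = true
        · -- A returns True; the head group (true, m+1) satisfies pB and survives the fold
          simp only [hs, if_pos, hK', if_pos]
          have hKm : K ≤ ((m + 1 : Nat) : Int) := by
            have : (m : Int) + 1 = K := by simpa using hK'
            push_cast; omega
          have : ((true, m + 1) :: t).any (pB K) = true := by
            simp only [List.any_cons, pB]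
            simp
            exact Or.inl (by push_cast at hKm ⊢; omega)
          rw [ht]
          exact (anyP_foldl K rest _ this).symm
        · -- continue scanning with counter m+1
          have hne : (m : Int) + 1 ≠ K := by simpa using hK'
          simp only [hs, if_pos, hK', if_neg, Bool.not_eq_true]
          have hm1 : ((m : Int) + 1) = ((m + 1 : Nat) : Int) := by push_cast; ring
          rw [hm1, ht]
          apply ih (m + 1)
          · push_cast; omega
          · have : pB K (true, m + 1) = false := by
              simp only [pB]
              simp
              push_cast; omega
            simp [List.any_cons, this, htany]
          · intro h; omega
          · intro _; exact ⟨t, rfl⟩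
      · -- occupied seat: counter resets to 0; a false-keyed head never satisfies pB
        have hsf : (s == 0) = false := by simpa using hs
        have hgs' : (stepB gs s).any (pB K) = false ∧
            (stepB gs s = [] ∨ ∃ n r, stepB gs s = (false, n) :: r) := by
          cases gs with
          | nil =>
              constructor
              · simp [stepB, hsf, pB]
              · right; exact ⟨1, [], by simp [stepB, hsf]⟩
          | cons g r =>
              obtain ⟨k, n⟩ := g
              simp only [List.any_cons, Bool.or_eq_false_iff] at hany
              by_cases hk : (k == (s == 0)) = true
              · have hkf : k = false := by
                  rw [hsf] at hk; simpa using hk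
                subst hkf
                constructor
                · have : pB K (false, n + 1) = false := by simp [pB]
                  simp [stepB, hsf, List.any_cons, this, hany.2]
                · right; exact ⟨n + 1, r, by simp [stepB, hsf]⟩
              · constructor
                · have hst : stepB ((k, n) :: r) s = (s == 0, 1) :: (k, n) :: r := by
                    simp [stepB, hk]
                  have hp1 : pB K (s == 0, 1) = false := by simp [pB, hsf]
                  rw [hst]
                  simp only [List.any_cons, hp1, hany.1, hany.2, Bool.or_self]
                · right
                  have hkt : k = true := by
                    rw [hsf] at hk; simpa using hk
                  refine ⟨1, (k, n) :: r, ?_⟩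
                  simp [stepB, hsf, hkt]
        unfold scanRowA
        simp only [hs, if_neg, Bool.not_eq_true]
        have h00 : ((0 : Nat) : Int) = (0 : Int) := rfl
        rw [← h00]
        exact ih 0 (stepB gs s) (by omega) hgs'.1 (fun _ => hgs'.2) (fun h => absurd h (by omega))

-- per-row equality for K ≥ 1
lemma row_eq (K : Int) (hK : 1 ≤ K) (row : List Int) :
    scanRowA K row 0 = (groupsB row).any (pB K) := by
  have := scan_eq_groups K hK row 0 [] (by omega) (by simp) (fun _ => Or.inl rfl)
      (fun h => absurd h (by omega))
  simpa [groupsB] using this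

-- the two ports agree on every input
lemma main_eq (seats : List (List Int)) (K : Int) :
    can_sell_tickets seats K = can_sell_tickets_alt seats K := by
  unfold can_sell_tickets can_sell_tickets_alt
  have hp : (fun g : Bool × Nat => g.1 && decide (K ≤ (g.2 : Int))) = pB K := rfl
  by_cases hK : K < 1
  · simp only [hK, if_pos]
    induction seats with
    | nil => rfl
    | cons row rest ih =>
        unfold rowsA
        rw [scanA_false_of_K_nonpos K (by omega) row 0 (by omega)]
        simpa using ih
  · simp only [hK, if_neg, Bool.not_eq_true, hp]
    have hK1 : 1 ≤ K := by omega
    induction seats with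
    | nil => rfl
    | cons row rest ih =>
        unfold rowsA
        rw [row_eq K hK1 row, List.any_cons, ih]
        cases h : (groupsB row).any (pB K) <;> simp [h]

-- ===== VERDICT (by name: the statement is the Claim_ definition above) =====
theorem can_sell_tickets_spec : Claim_equal_can_sell_tickets := by
  intro seats K _
  exact main_eq seats K
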